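-- pv_equiv track=rewrite | github.com/yamaguchigo1923/uruno_ocr_backend | test/label_test/run_label_test.py | _count_nonempty_columns
-- ===== SOURCE A (Python) =====
-- from typing import Any, Dict, List, Tuple, Optional
--
-- def _count_nonempty_columns(table: List[List[str]]) -> int:
--     if not table:
--         return 0
--     max_cols = max((len(r) for r in table), default=0)
--     nonempty = 0
--     for c in range(max_cols):
--         has_val = False
--         for r in table:
--             if c < len(r) and str(r[c]).strip():
--                 has_val = True
--                 break
--         if has_val:
--             nonempty += 1
--     return nonempty
-- ===== SOURCE B (Python) =====
-- from typing import List
--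
-- def _count_nonempty_columns(table: List[List[str]]) -> int:
--     nonempty_cols = set()
--     for row in table:
--         for c, cell in enumerate(row):
--             if str(cell).strip():
--                 nonempty_cols.add(c)
--     return len(nonempty_cols)
-- ===== Notes on version B (the rewrite author's own statement) =====
-- stated objective: simpler
-- what changed: Single row-major pass collecting the set of column indices that hold a nonempty stripped value (its size is the answer), instead of computing max_cols and scanning each column across all rows with an early break.
import Mathlib
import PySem

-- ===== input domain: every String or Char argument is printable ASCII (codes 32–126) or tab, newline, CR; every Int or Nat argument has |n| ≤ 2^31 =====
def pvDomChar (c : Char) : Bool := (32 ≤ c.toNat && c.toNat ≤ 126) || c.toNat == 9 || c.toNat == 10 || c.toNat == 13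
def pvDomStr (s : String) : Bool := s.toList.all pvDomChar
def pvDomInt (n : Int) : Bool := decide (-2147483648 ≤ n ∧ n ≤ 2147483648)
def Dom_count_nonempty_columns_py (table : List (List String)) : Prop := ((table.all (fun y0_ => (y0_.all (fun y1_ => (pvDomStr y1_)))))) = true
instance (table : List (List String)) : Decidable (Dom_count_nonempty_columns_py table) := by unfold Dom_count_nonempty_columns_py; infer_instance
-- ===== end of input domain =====

-- B replaces A's column-major scan (max_cols + per-column early-break search) by one
-- row-major pass that collects the set of nonempty column indices; objective: simpler.

-- ===== PORT A =====
-- inner 'for r in table: ... break' loop of A: is there a row with a nonempty value at column c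
def pvHasValA (c : Int) : List (List String) → Bool
  | [] => false
  | r :: rs =>
    if c < (r.length : Int) ∧ PySem.Chars.strip ((PySem.List.pyGetD r c "").toList) ≠ [] then
      true
    else pvHasValA c rs

def count_nonempty_columns_py (table : List (List String)) : Int :=
  if table = [] then 0
  else
    let max_cols := PySem.List.maxD (table.map fun r => ((r.length : Int))) (fun x => x) 0
    (PySem.List.pyRange 0 max_cols 1).foldl
      (fun nonempty c => if pvHasValA c table then nonempty + 1 else nonempty) 0

-- ===== PORT B =====
def count_nonempty_columns_py_alt (table : List (List String)) : Int :=
  let cols : PySem.Set Int :=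
    table.foldl (fun s row =>
      (PySem.List.enumerate row).foldl (fun s p =>
        if PySem.Chars.strip p.2.toList ≠ [] then PySem.Set.add s p.1 else s) s)
      PySem.Set.empty
  PySem.Set.len cols

-- ===== PRECONDITION & SPEC =====
def Spec_count_nonempty_columns_py (table : List (List String)) (out : Int) : Prop := out = count_nonempty_columns_py_alt table
instance (table : List (List String)) (out : Int) : Decidable (Spec_count_nonempty_columns_py table out) := by unfold Spec_count_nonempty_columns_py; infer_instance

-- ===== CLAIM (what is proved, stated in full; the proofs are below) =====
def Claim_equal_count_nonempty_columns_py : Prop := ∀ (table : List (List String)), Dom_count_nonempty_columns_py table → Spec_count_nonempty_columns_py table (count_nonempty_columns_py table)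

-- ===== LEMMAS AND PROOFS =====

-- "column c holds a nonempty (after strip) value somewhere in table"
def pvColHit (table : List (List String)) (c : Int) : Prop :=
  ∃ r ∈ table, ∃ k : Nat, k < r.length ∧ c = (k : Int) ∧
    PySem.Chars.strip ((PySem.List.pyGetD r (k : Int) "").toList) ≠ []

theorem pvHasValA_iff (table : List (List String)) (c : Int) (hc : 0 ≤ c) :
    pvHasValA c table = true ↔ pvColHit table c := by
  induction table with
  | nil => simp [pvHasValA, pvColHit]
  | cons r rs ih =>
    simp only [pvHasValA]
    split
    · rename_i h
      simp only [true_iff]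
      refine ⟨r, List.mem_cons_self, c.toNat, by omega, by omega, ?_⟩
      have : ((c.toNat : Int)) = c := by omega
      rw [this]; exact h.2
    · rename_i h
      rw [ih]
      constructor
      · rintro ⟨r', hr', k, hk, rfl, hne⟩
        exact ⟨r', List.mem_cons_of_mem _ hr', k, hk, rfl, hne⟩
      · rintro ⟨r', hr', k, hk, rfl, hne⟩
        rcases List.mem_cons.mp hr' with rfl | hr'
        · exact absurd ⟨by exact_mod_cast hk, hne⟩ h
        · exact ⟨r', hr', k, hk, rfl, hne⟩

theorem pvPairFold_mem (ps : List (Int × String)) (s : PySem.Set Int) (x : Int) :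
    x ∈ ps.foldl (fun s p =>
        if PySem.Chars.strip p.2.toList ≠ [] then PySem.Set.add s p.1 else s) s ↔
      x ∈ s ∨ ∃ p ∈ ps, PySem.Chars.strip p.2.toList ≠ [] ∧ x = p.1 := by
  induction ps generalizing s with
  | nil => simp
  | cons p ps ih =>
    simp only [List.foldl_cons, ih]
    by_cases h : PySem.Chars.strip p.2.toList ≠ []
    · simp only [if_pos h, PySem.Set.mem_add]
      constructor
      · rintro (⟨hx | rfl⟩ | ⟨q, hq, hs, rfl⟩)
        · exact Or.inl hx
        · exact Or.inr ⟨p, List.mem_cons_self, h, rfl⟩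
        · exact Or.inr ⟨q, List.mem_cons_of_mem _ hq, hs, rfl⟩
      · rintro (hx | ⟨q, hq, hs, rfl⟩)
        · exact Or.inl (Or.inl hx)
        · rcases List.mem_cons.mp hq with rfl | hq
          · exact Or.inl (Or.inr rfl)
          · exact Or.inr ⟨q, hq, hs, rfl⟩
    · simp only [if_neg h]
      constructor
      · rintro (hx | ⟨q, hq, hs, rfl⟩)
        · exact Or.inl hx
        · exact Or.inr ⟨q, List.mem_cons_of_mem _ hq, hs, rfl⟩
      · rintro (hx | ⟨q, hq, hs, rfl⟩)
        · exact Or.inl hx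
        · rcases List.mem_cons.mp hq with rfl | hq
          · exact absurd hs h
          · exact Or.inr ⟨q, hq, hs, rfl⟩

theorem pvPairFold_nodup (ps : List (Int × String)) (s : PySem.Set Int) (hs : s.Nodup) :
    (ps.foldl (fun s p =>
        if PySem.Chars.strip p.2.toList ≠ [] then PySem.Set.add s p.1 else s) s).Nodup := by
  induction ps generalizing s with
  | nil => exact hs
  | cons p ps ih =>
    simp only [List.foldl_cons]
    apply ih
    split
    · exact PySem.Set.nodup_add s p.1 hs
    · exact hs

theorem pvInnerFold_mem (row : List String) (s : PySem.Set Int) (x : Int) :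
    x ∈ (PySem.List.enumerate row).foldl (fun s p =>
        if PySem.Chars.strip p.2.toList ≠ [] then PySem.Set.add s p.1 else s) s ↔
      x ∈ s ∨ ∃ k : Nat, k < row.length ∧ x = (k : Int) ∧
        PySem.Chars.strip ((PySem.List.pyGetD row (k : Int) "").toList) ≠ [] := by
  rw [pvPairFold_mem]
  apply or_congr Iff.rfl
  constructor
  · rintro ⟨p, hp, hs, rfl⟩
    rcases (PySem.List.mem_enumerate_iff row 0 p).mp hp with ⟨k, hk, rfl⟩
    refine ⟨k, hk, by simp, ?_⟩
    rwa [PySem.List.pyGetD_natCast, List.getD_eq_getElem _ _ hk]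
  · rintro ⟨k, hk, rfl, hne⟩
    refine ⟨((k : Int), row[k]), (PySem.List.mem_enumerate_iff row 0 _).mpr ⟨k, hk, by simp⟩, ?_, rfl⟩
    rwa [PySem.List.pyGetD_natCast, List.getD_eq_getElem _ _ hk] at hne

theorem pvOuterFold_mem (table : List (List String)) (s : PySem.Set Int) (x : Int) :
    x ∈ table.foldl (fun s row =>
        (PySem.List.enumerate row).foldl (fun s p =>
          if PySem.Chars.strip p.2.toList ≠ [] then PySem.Set.add s p.1 else s) s) s ↔
      x ∈ s ∨ pvColHit table x := by
  induction table generalizing s with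
  | nil => simp [pvColHit]
  | cons row rest ih =>
    simp only [List.foldl_cons, ih, pvInnerFold_mem]
    constructor
    · rintro ((hx | ⟨k, hk, rfl, hne⟩) | ⟨r, hr, k, hk, rfl, hne⟩)
      · exact Or.inl hx
      · exact Or.inr ⟨row, List.mem_cons_self, k, hk, rfl, hne⟩
      · exact Or.inr ⟨r, List.mem_cons_of_mem _ hr, k, hk, rfl, hne⟩
    · rintro (hx | ⟨r, hr, k, hk, rfl, hne⟩)
      · exact Or.inl (Or.inl hx)
      · rcases List.mem_cons.mp hr with rfl | hr
        · exact Or.inl (Or.inr ⟨k, hk, rfl, hne⟩)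
        · exact Or.inr ⟨r, hr, k, hk, rfl, hne⟩

theorem pvOuterFold_nodup (table : List (List String)) (s : PySem.Set Int) (hs : s.Nodup) :
    (table.foldl (fun s row =>
        (PySem.List.enumerate row).foldl (fun s p =>
          if PySem.Chars.strip p.2.toList ≠ [] then PySem.Set.add s p.1 else s) s) s).Nodup := by
  induction table generalizing s with
  | nil => exact hs
  | cons row rest ih => exact ih _ (pvPairFold_nodup _ _ hs)

theorem pvColHit_bound (table : List (List String)) (c : Int) (h : pvColHit table c) :
    0 ≤ c ∧ c < PySem.List.maxD (table.map fun r => ((r.length : Int))) (fun x => x) 0 := by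
  rcases h with ⟨r, hr, k, hk, rfl, -⟩
  refine ⟨by positivity, ?_⟩
  have hle : ((r.length : Int)) ≤ PySem.List.maxD (table.map fun r => ((r.length : Int))) (fun x => x) 0 :=
    PySem.List.le_maxD_id _ 0 _ (List.mem_map_of_mem hr)
  omega

-- ===== VERDICT (by name: the statement is the Claim_ definition above) =====
theorem count_nonempty_columns_py_spec : Claim_equal_count_nonempty_columns_py := by
  intro table _
  unfold Spec_count_nonempty_columns_py count_nonempty_columns_py count_nonempty_columns_py_alt
  by_cases htab : table = []
  · subst htab; rfl
  · rw [if_neg htab]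
    set M := PySem.List.maxD (table.map fun r => ((r.length : Int))) (fun x => x) 0 with hM
    set S := table.foldl (fun s row =>
        (PySem.List.enumerate row).foldl (fun s p =>
          if PySem.Chars.strip p.2.toList ≠ [] then PySem.Set.add s p.1 else s) s)
      PySem.Set.empty with hS
    rw [PySem.List.foldl_count_if (fun c => pvHasValA c table) _ 0]
    simp only [zero_add, PySem.Set.len]
    rw [List.countP_eq_length_filter]
    congr 1
    have hperm : ((PySem.List.pyRange 0 M 1).filter (fun c => pvHasValA c table)).Perm S := by
      rw [List.perm_ext_iff_of_nodup
        ((PySem.List.nodup_pyRange_one 0 M).filter _)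
        (pvOuterFold_nodup table PySem.Set.empty List.nodup_nil)]
      intro c
      rw [List.mem_filter, PySem.List.mem_pyRange_one, ← hS, pvOuterFold_mem]
      constructor
      · rintro ⟨⟨h0, -⟩, hval⟩
        exact Or.inr ((pvHasValA_iff table c h0).mp hval)
      · rintro (hmem | hhit)
        · exact absurd hmem (List.not_mem_nil)
        · have hb := pvColHit_bound table c hhit
          exact ⟨⟨hb.1, hb.2⟩, (pvHasValA_iff table c hb.1).mpr hhit⟩
    exact hperm.length_eq
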